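-- pv_equiv track=rewrite | github.com/Rain0221/Unibot | modules/pjskinfo.py | txt2html
-- ===== SOURCE A (Python) =====
-- def txt2html(txt):
--     # 来自https://www.it610.com/article/1502111.htm
--     def escape(txt):
--         txt = txt.replace('&', '&#38;')
--         txt = txt.replace(' ', '&#160;')
--         txt = txt.replace('<', '&#60;')
--         txt = txt.replace('>', '&#62;')
--         txt = txt.replace('"', '&#34;')
--         txt = txt.replace('\'', '&#39;')
--         return txt
--     txt = escape(txt)
--     lines = txt.split('\n')
--     for i, line in enumerate(lines):
--         lines[i] = line + '</br>'
--     txt = ''.join(lines)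
--     return r'<!doctype html><html><head><meta charset="utf-8"><title>日志</title></head><body>' + txt + '</body></html>'
-- ===== SOURCE B (Python) =====
-- _TABLE = str.maketrans({'&': '&#38;', ' ': '&#160;', '<': '&#60;', '>': '&#62;',
--                         '"': '&#34;', "'": '&#39;', '\n': '</br>'})
--
-- def txt2html(txt):
--     head = r'<!doctype html><html><head><meta charset="utf-8"><title>日志</title></head><body>'
--     return head + txt.translate(_TABLE) + '</br>' + '</body></html>'
-- ===== Notes on version B (the rewrite author's own statement) =====
-- stated objective: idiomatic
-- what changed: B escapes the text in a single table-driven pass (str.maketrans/translate, with newline mapped to the line-break tag in the same table) and appends one trailing break tag, replacing A's six sequential full-string replace passes plus split/enumerate-append/join.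
import Mathlib
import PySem

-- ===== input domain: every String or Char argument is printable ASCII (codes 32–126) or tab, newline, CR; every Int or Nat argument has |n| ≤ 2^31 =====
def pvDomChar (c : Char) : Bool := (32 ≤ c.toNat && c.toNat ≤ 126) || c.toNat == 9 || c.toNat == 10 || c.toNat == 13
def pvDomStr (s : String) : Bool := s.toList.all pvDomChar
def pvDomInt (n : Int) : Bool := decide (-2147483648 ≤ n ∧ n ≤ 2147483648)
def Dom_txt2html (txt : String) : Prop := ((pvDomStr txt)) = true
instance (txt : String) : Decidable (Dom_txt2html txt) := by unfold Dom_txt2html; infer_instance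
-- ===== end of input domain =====

-- B escapes the text in ONE table-driven pass over the characters (incl. '\n' → '</br>')
-- instead of A's six sequential .replace passes plus split/append/join; objective: idiomatic.

-- ===== PORT A =====
-- literal port of A: six sequential single-character replaces, split on '\n',
-- append '</br>' to every line, join, wrap in the fixed page skeleton
def txt2htmlEscape (t : List Char) : List Char :=
  let t := PySem.Chars.replace t ['&'] "&#38;".toList
  let t := PySem.Chars.replace t [' '] "&#160;".toList
  let t := PySem.Chars.replace t ['<'] "&#60;".toList
  let t := PySem.Chars.replace t ['>'] "&#62;".toList
  let t := PySem.Chars.replace t ['"'] "&#34;".toList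
  let t := PySem.Chars.replace t ['\''] "&#39;".toList
  t

def txt2html (txt : String) : String :=
  let t := txt2htmlEscape txt.toList
  let lines := PySem.Chars.splitOn t ['\n']
  let lines := lines.map (fun line => line ++ "</br>".toList)
  let t := PySem.Chars.join [] lines
  String.ofList ("<!doctype html><html><head><meta charset=\"utf-8\"><title>日志</title></head><body>".toList
    ++ t ++ "</body></html>".toList)

-- ===== PORT B =====
-- the translation table of Source B, as a character-to-string map
def txt2htmlTable (c : Char) : List Char :=
  if c = '&' then "&#38;".toList
  else if c = ' ' then "&#160;".toList
  else if c = '<' then "&#60;".toList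
  else if c = '>' then "&#62;".toList
  else if c = '"' then "&#34;".toList
  else if c = '\'' then "&#39;".toList
  else if c = '\n' then "</br>".toList
  else [c]

def txt2html_alt (txt : String) : String :=
  String.ofList ("<!doctype html><html><head><meta charset=\"utf-8\"><title>日志</title></head><body>".toList
    ++ txt.toList.flatMap txt2htmlTable ++ "</br>".toList ++ "</body></html>".toList)

-- ===== PRECONDITION & SPEC =====
def Spec_txt2html (txt : String) (out : String) : Prop := out = txt2html_alt txt
instance (txt : String) (out : String) : Decidable (Spec_txt2html txt out) := by unfold Spec_txt2html; infer_instance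

-- ===== CLAIM (what is proved, stated in full; the proofs are below) =====
def Claim_equal_txt2html : Prop := ∀ (txt : String), Dom_txt2html txt → Spec_txt2html txt (txt2html txt)

-- ===== LEMMAS AND PROOFS =====

-- a single-character replace is a per-character substitution
lemma replace_go_single (c : Char) (new : List Char) :
    ∀ (fuel : Nat) (l acc : List Char), l.length ≤ fuel →
      PySem.Chars.replace.go [c] new fuel l acc
        = acc.reverse ++ l.flatMap (fun x => if x = c then new else [x]) := by
  intro fuel
  induction fuel with
  | zero =>
    intro l acc h
    have hl : l = [] := by cases l with | nil => rfl | cons a t => simp at h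
    subst hl; simp [PySem.Chars.replace.go]
  | succ n ih =>
    intro l acc h
    cases l with
    | nil => simp [PySem.Chars.replace.go]
    | cons x t =>
      simp only [PySem.Chars.replace.go, List.isPrefixOf, Bool.and_true]
      by_cases hx : c = x
      · subst hx
        simp only [beq_self_eq_true, if_pos]
        have hd : List.drop [c].length (c :: t) = t := rfl
        rw [hd, ih t _ (by simpa using Nat.le_of_succ_le_succ h)]
        simp
      · have : (c == x) = false := by simpa using hx
        simp only [this, Bool.false_eq_true, if_neg, not_false_iff]
        rw [ih t _ (Nat.le_of_succ_le_succ h)]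
        have hxc : ¬ (x = c) := fun e => hx e.symm
        simp [hxc]

lemma replace_single (c : Char) (new : List Char) (l : List Char) :
    PySem.Chars.replace l [c] new = l.flatMap (fun x => if x = c then new else [x]) := by
  simpa using replace_go_single c new l.length l [] (Nat.le_refl _)

lemma intercalate_nil_eq_flatten (xs : List (List Char)) :
    List.intercalate ([] : List Char) xs = xs.flatten := by
  induction xs with
  | nil => rfl
  | cons a t ih => cases t <;> simp_all [List.intercalate, List.intersperse]

-- split on a character, append suf to every piece, join:
-- a per-character substitution of that character by suf, plus a trailing suf
lemma split_join_go (c : Char) (suf : List Char) :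
    ∀ (fuel : Nat) (l cur : List Char) (acc : List (List Char)), l.length ≤ fuel →
      PySem.Chars.join []
          ((PySem.Chars.splitOn.go [c] fuel l cur acc).map (fun s => s ++ suf))
        = ((acc.reverse.map (fun s => s ++ suf)).flatten) ++ cur.reverse
            ++ l.flatMap (fun x => if x = c then suf else [x]) ++ suf := by
  intro fuel
  induction fuel with
  | zero =>
    intro l cur acc h
    have hl : l = [] := by cases l with | nil => rfl | cons a t => simp at h
    subst hl
    simp [PySem.Chars.splitOn.go, PySem.Chars.join, intercalate_nil_eq_flatten]
  | succ n ih =>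
    intro l cur acc h
    cases l with
    | nil => simp [PySem.Chars.splitOn.go, PySem.Chars.join, intercalate_nil_eq_flatten]
    | cons x t =>
      simp only [PySem.Chars.splitOn.go, List.isPrefixOf, Bool.and_true]
      by_cases hx : c = x
      · subst hx
        simp only [beq_self_eq_true, if_pos]
        have hd : List.drop [c].length (c :: t) = t := rfl
        rw [hd, ih t [] _ (by simpa using Nat.le_of_succ_le_succ h)]
        simp
      · have : (c == x) = false := by simpa using hx
        simp only [this, Bool.false_eq_true, if_neg, not_false_iff]
        rw [ih t (x :: cur) acc (Nat.le_of_succ_le_succ h)]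
        have hxc : ¬ (x = c) := fun e => hx e.symm
        simp [hxc]

lemma split_join (c : Char) (suf : List Char) (l : List Char) :
    PySem.Chars.join []
        ((PySem.Chars.splitOn l [c]).map (fun s => s ++ suf))
      = l.flatMap (fun x => if x = c then suf else [x]) ++ suf := by
  have := split_join_go c suf (l.length + 1) l [] [] (Nat.le_succ _)
  simpa [PySem.Chars.splitOn] using this

-- the six substitutions followed by the newline substitution coincide,
-- character by character, with B's table
lemma table_eq (x : Char) :
    (if x = '&' then "&#38;".toList else [x]).flatMap (fun x =>
      (if x = ' ' then "&#160;".toList else [x]).flatMap (fun x =>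
        (if x = '<' then "&#60;".toList else [x]).flatMap (fun x =>
          (if x = '>' then "&#62;".toList else [x]).flatMap (fun x =>
            (if x = '"' then "&#34;".toList else [x]).flatMap (fun x =>
              (if x = '\'' then "&#39;".toList else [x]).flatMap (fun x =>
                if x = '\n' then "</br>".toList else [x]))))))
    = txt2htmlTable x := by
  by_cases h1 : x = '&'
  · subst h1; decide
  by_cases h2 : x = ' '
  · subst h2; decide
  by_cases h3 : x = '<'
  · subst h3; decide
  by_cases h4 : x = '>'
  · subst h4; decide
  by_cases h5 : x = '"'
  · subst h5; decide
  by_cases h6 : x = '\''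
  · subst h6; decide
  by_cases h7 : x = '\n'
  · subst h7; decide
  · simp [txt2htmlTable, h1, h2, h3, h4, h5, h6, h7]

lemma body_eq (l : List Char) :
    PySem.Chars.join []
        ((PySem.Chars.splitOn (txt2htmlEscape l) ['\n']).map (fun line => line ++ "</br>".toList))
      = l.flatMap txt2htmlTable ++ "</br>".toList := by
  rw [split_join]
  unfold txt2htmlEscape
  simp only [replace_single, List.flatMap_assoc]
  congr 1
  apply List.flatMap_congr
  intro x _
  simpa using table_eq x

-- ===== VERDICT (by name: the statement is the Claim_ definition above) =====
theorem txt2html_spec : Claim_equal_txt2html := by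
  intro txt _
  unfold Spec_txt2html txt2html txt2html_alt
  simp only [body_eq, List.append_assoc]
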